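-- pv_equiv track=rewrite | github.com/az365/snakee | utils/mappers.py | sum_by_keys
-- ===== SOURCE A (Python) =====
-- def sum_by_keys(records, keys, counters):
--     result = dict()
--     for r in records:
--         cur_key = tuple([r.get(k) for k in keys])
--         if cur_key not in result:
--             result[cur_key] = dict()
--         for c in counters:
--             result[cur_key][c] = result[cur_key].get(c, 0) + r.get(c, 0)
--     yield from result.items()
-- ===== SOURCE B (Python) =====
-- def sum_by_keys(records, keys, counters):
--     records = list(records)
--     key_of = lambda r: tuple(r.get(k) for k in keys)
--     order = list(dict.fromkeys(key_of(r) for r in records))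
--     for kt in order:
--         bucket = [r for r in records if key_of(r) == kt]
--         yield kt, {c: sum(r.get(c, 0) for r in bucket) for c in counters}
-- ===== Notes on version B (the rewrite author's own statement) =====
-- stated objective: alternative
-- what changed: Replaces A's fused single pass that accumulates nested dicts-of-counters with a two-phase decomposition: an ordered dedup of the key tuples, then per key a filter of the records and a per-counter sum.
-- outside the precondition, e.g. on sum_by_keys([{'x': 1}], [], ['x', 'x']): A returns [((), {'x': 2})], B returns [((), {'x': 1})]
import Mathlib
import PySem

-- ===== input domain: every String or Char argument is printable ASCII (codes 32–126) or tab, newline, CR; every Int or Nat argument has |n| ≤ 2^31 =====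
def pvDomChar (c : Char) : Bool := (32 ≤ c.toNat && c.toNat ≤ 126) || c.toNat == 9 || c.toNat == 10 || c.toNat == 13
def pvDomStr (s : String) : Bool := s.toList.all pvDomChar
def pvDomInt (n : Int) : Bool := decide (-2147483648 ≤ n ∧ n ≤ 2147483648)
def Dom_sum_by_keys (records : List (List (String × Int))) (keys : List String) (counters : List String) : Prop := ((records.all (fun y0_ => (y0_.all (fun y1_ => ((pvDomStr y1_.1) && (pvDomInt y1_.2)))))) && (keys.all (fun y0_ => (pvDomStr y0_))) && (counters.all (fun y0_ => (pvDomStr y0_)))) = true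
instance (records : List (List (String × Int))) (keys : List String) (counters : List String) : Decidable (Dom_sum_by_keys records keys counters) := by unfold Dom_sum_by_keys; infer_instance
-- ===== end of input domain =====

-- B replaces A's fused one-pass dict-of-dicts accumulation by a different decomposition:
-- ordered dedup of the key tuples, then per key a filter of the records and per counter a sum
-- (objective: alternative; return-value equivalence only — both are generators in Python).

-- ===== PORT A =====
def sum_by_keys (records : List (List (String × Int))) (keys : List String) (counters : List String) : List (List (Option Int) × (List (String × Int))) :=
  ((records.foldl (fun (result : PySem.Dict (List (Option Int)) (PySem.Dict String Int)) r =>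
      counters.foldl (fun result c =>
          result.insert (keys.map (fun k => (PySem.Dict.ofList r).get? k))
            ((result.getD (keys.map (fun k => (PySem.Dict.ofList r).get? k)) PySem.Dict.empty).insert c
              ((result.getD (keys.map (fun k => (PySem.Dict.ofList r).get? k)) PySem.Dict.empty).getD c 0
                + (PySem.Dict.ofList r).getD c 0)))
        (if result.contains (keys.map (fun k => (PySem.Dict.ofList r).get? k)) then result
         else result.insert (keys.map (fun k => (PySem.Dict.ofList r).get? k)) PySem.Dict.empty))
    PySem.Dict.empty).items).map (fun p => (p.1, p.2.items))

-- ===== PORT B =====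
def sum_by_keys_alt (records : List (List (String × Int))) (keys : List String) (counters : List String) : List (List (Option Int) × (List (String × Int))) :=
  (PySem.List.dedup (records.map (fun r => keys.map (fun k => (PySem.Dict.ofList r).get? k)))).map
    (fun kt =>
      (kt, counters.map (fun c =>
        (c, ((records.filter (fun r => (keys.map (fun k => (PySem.Dict.ofList r).get? k)) == kt)).map
              (fun r => (PySem.Dict.ofList r).getD c 0)).sum))))

-- ===== PRECONDITION & SPEC =====
-- Pre_ excludes duplicate names in `counters`, a corner no caller would specify: there A's repeated
-- accumulation counts each record once per occurrence (doubling the sums) while B's dict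
-- comprehension sums each record once — both values are accidental readings of a duplicate key.
def Pre_sum_by_keys (records : List (List (String × Int))) (keys : List String) (counters : List String) : Prop := counters.Nodup
instance (records : List (List (String × Int))) (keys : List String) (counters : List String) : Decidable (Pre_sum_by_keys records keys counters) := by unfold Pre_sum_by_keys; infer_instance
def pvWitness_sum_by_keys : (List (List (String × Int))) × List String × List String :=
  ([[("a", 1), ("n", 2)], [("a", 1), ("n", 3)], [("a", 2), ("n", 5)]], ["a"], ["n"])
def Spec_sum_by_keys (records : List (List (String × Int))) (keys : List String) (counters : List String) (out : List (List (Option Int) × (List (String × Int)))) : Prop := out = sum_by_keys_alt records keys counters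
instance (records : List (List (String × Int))) (keys : List String) (counters : List String) (out : List (List (Option Int) × (List (String × Int)))) : Decidable (Spec_sum_by_keys records keys counters out) := by unfold Spec_sum_by_keys; infer_instance

-- ===== CLAIM (what is proved, stated in full; the proofs are below) =====
def Claim_equal_sum_by_keys : Prop := ∀ (records : List (List (String × Int))) (keys : List String) (counters : List String), Dom_sum_by_keys records keys counters → Pre_sum_by_keys records keys counters → Spec_sum_by_keys records keys counters (sum_by_keys records keys counters)

-- ===== LEMMAS AND PROOFS =====
theorem pv_insert_getD_self {κ ν : Type} [BEq κ] [LawfulBEq κ] (d : PySem.Dict κ ν) (k : κ) (e : ν)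
    (hnd : d.keys.Nodup) (hc : d.contains k = true) : d.insert k (d.getD k e) = d := by
  apply PySem.Dict.ext
  rw [PySem.Dict.items_insert_of_contains d _ hc]
  conv_rhs => rw [← List.map_id d.items]
  apply List.map_congr_left
  rintro ⟨q1, q2⟩ hq
  by_cases hqk : q1 = k
  · subst hqk
    have hv := PySem.Dict.getD_of_mem_items d hq hnd e
    simp [hv]
  · simp [hqk]

theorem pv_outer_fold {κ ν : Type} [BEq κ] [LawfulBEq κ] (cs : List String) (g : ν → String → ν) (e : ν) :
    ∀ (d : PySem.Dict κ ν) (k : κ), d.keys.Nodup → d.contains k = true →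
    cs.foldl (fun d c => d.insert k (g (d.getD k e) c)) d = d.insert k (cs.foldl g (d.getD k e)) := by
  induction cs with
  | nil => intro d k hnd hc; simp [pv_insert_getD_self d k e hnd hc]
  | cons c cs ih =>
    intro d k hnd hc
    simp only [List.foldl_cons]
    rw [ih (d.insert k (g (d.getD k e) c)) k
        (by rw [PySem.Dict.keys_insert_of_contains d _ hc]; exact hnd)
        (PySem.Dict.contains_insert_self d k _)]
    rw [PySem.Dict.getD_insert_self, PySem.Dict.insert_insert_self]
theorem pv_inner_fresh {κ : Type} [BEq κ] [LawfulBEq κ] (cs : List κ) (f : κ → Int) :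
    ∀ (t : PySem.Dict κ Int), cs.Nodup → (∀ c ∈ cs, t.contains c = false) →
    cs.foldl (fun t c => t.insert c (t.getD c 0 + f c)) t = PySem.Dict.mk (t.items ++ cs.map (fun c => (c, f c))) := by
  induction cs with
  | nil => intro t _ _; simp
  | cons c cs ih =>
    intro t hnd hf
    simp only [List.foldl_cons]
    have hc : t.contains c = false := hf c (by simp)
    have h0 : t.getD c 0 = 0 := PySem.Dict.getD_of_not_contains t 0 hc
    rw [h0, zero_add]
    rw [ih (t.insert c (f c)) (List.Nodup.of_cons hnd) ?_]
    · rw [PySem.Dict.items_insert_of_not_contains t _ hc]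
      simp
    · intro c' hc'
      rw [PySem.Dict.contains_insert]
      have : c' ≠ c := by rintro rfl; exact (List.nodup_cons.mp hnd).1 hc'
      simp [this, hf c' (by simp [hc'])]
theorem pv_inner_overwrite {κ : Type} [BEq κ] [LawfulBEq κ] (cs : List κ) (f s : κ → Int) :
    ∀ (pre : List (κ × Int)), (pre.map Prod.fst ++ cs).Nodup →
    cs.foldl (fun t c => t.insert c (t.getD c 0 + f c)) (PySem.Dict.mk (pre ++ cs.map (fun c => (c, s c))))
      = PySem.Dict.mk (pre ++ cs.map (fun c => (c, s c + f c))) := by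
  induction cs with
  | nil => intro pre _; simp
  | cons c cs ih =>
    intro pre hnd
    simp only [List.foldl_cons, List.map_cons]
    have hcp : c ∉ pre.map Prod.fst := by
      have hd := (List.nodup_append.mp hnd).2.2
      intro hmemp
      exact hd c hmemp c (by simp) rfl
    have hccs : c ∉ cs := (List.nodup_cons.mp hnd.of_append_right).1
    set t : PySem.Dict κ Int := PySem.Dict.mk (pre ++ (c, s c) :: cs.map (fun c => (c, s c))) with ht
    have hkeys : t.keys = pre.map Prod.fst ++ c :: cs := by
      simp [ht, PySem.Dict.keys_mk, Function.comp_def]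
    have hknd : t.keys.Nodup := by rw [hkeys]; exact hnd
    have hmem : (c, s c) ∈ t.items := by simp [ht]
    have hget : t.getD c 0 = s c := PySem.Dict.getD_of_mem_items t hmem hknd 0
    have hcont : t.contains c = true := by rw [PySem.Dict.contains_mk]; simp
    rw [hget]
    have hitems : (t.insert c (s c + f c)) = PySem.Dict.mk ((pre ++ [(c, s c + f c)]) ++ cs.map (fun c => (c, s c))) := by
      apply PySem.Dict.ext
      rw [PySem.Dict.items_insert_of_contains t _ hcont]
      show List.map _ (pre ++ (c, s c) :: cs.map (fun c => (c, s c))) = _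
      rw [List.map_append, List.map_cons]
      have h1 : List.map (fun p => if (p.1 == c) = true then (c, s c + f c) else p) pre = pre := by
        conv_rhs => rw [← List.map_id pre]
        apply List.map_congr_left
        rintro ⟨q1, q2⟩ hq
        have : q1 ≠ c := by rintro rfl; exact hcp (List.mem_map_of_mem hq)
        simp [this]
      have h2 : List.map (fun p => if (p.1 == c) = true then (c, s c + f c) else p) (cs.map (fun c => (c, s c))) = cs.map (fun c => (c, s c)) := by
        rw [List.map_map]
        apply List.map_congr_left
        intro c' hc'
        have : c' ≠ c := by rintro rfl; exact hccs hc'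
        simp [Function.comp, this]
      rw [h1, h2]
      simp
    rw [hitems, ih (pre ++ [(c, s c + f c)]) (by simpa using hnd)]
    simp
theorem pv_dedup_append {α : Type} [BEq α] [LawfulBEq α] (xs : List α) (x : α) :
    PySem.List.dedup (xs ++ [x]) = if x ∈ xs then PySem.List.dedup xs else PySem.List.dedup xs ++ [x] := by
  show PySem.Set.ofList (xs ++ [x]) = if x ∈ xs then PySem.Set.ofList xs else PySem.Set.ofList xs ++ [x]
  rw [PySem.Set.ofList_eq_foldl, List.foldl_append, ← PySem.Set.ofList_eq_foldl]
  simp only [List.foldl_cons, List.foldl_nil]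
  unfold PySem.Set.add PySem.Set.contains
  by_cases hx : x ∈ xs
  · simp [PySem.Set.mem_ofList, hx]
  · simp [PySem.Set.mem_ofList, hx]
def pvKeyF (keys : List String) (r : List (String × Int)) : List (Option Int) :=
  keys.map (fun k => (PySem.Dict.ofList r).get? k)
def pvRv (r : List (String × Int)) (c : String) : Int := (PySem.Dict.ofList r).getD c 0
def pvS (keys : List String) (p : List (List (String × Int))) (kt : List (Option Int)) (c : String) : Int :=
  ((p.filter (fun r => pvKeyF keys r == kt)).map (fun r => pvRv r c)).sum
def pvCanon (keys counters : List String) (p : List (List (String × Int))) : PySem.Dict (List (Option Int)) (PySem.Dict String Int) :=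
  PySem.Dict.mk ((PySem.List.dedup (p.map (pvKeyF keys))).map
    (fun kt => (kt, PySem.Dict.mk (counters.map (fun c => (c, pvS keys p kt c))))))

theorem pvS_append_ne (keys : List String) (p : List (List (String × Int))) (r : List (String × Int))
    (kt : List (Option Int)) (c : String) (hne : pvKeyF keys r ≠ kt) :
    pvS keys (p ++ [r]) kt c = pvS keys p kt c := by
  unfold pvS; rw [List.filter_append]; simp [hne]

theorem pvS_append_eq (keys : List String) (p : List (List (String × Int))) (r : List (String × Int)) (c : String) :
    pvS keys (p ++ [r]) (pvKeyF keys r) c = pvS keys p (pvKeyF keys r) c + pvRv r c := by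
  unfold pvS; rw [List.filter_append]; simp

theorem pvS_not_mem (keys : List String) (p : List (List (String × Int)))
    (kt : List (Option Int)) (c : String) (hnm : kt ∉ p.map (pvKeyF keys)) :
    pvS keys p kt c = 0 := by
  unfold pvS
  have : p.filter (fun r => pvKeyF keys r == kt) = [] := by
    rw [List.filter_eq_nil_iff]
    intro r hr
    simp only [beq_iff_eq]
    intro he
    exact hnm (he ▸ List.mem_map_of_mem hr)
  simp [this]

theorem pv_keys_canon (keys counters : List String) (p : List (List (String × Int))) :
    (pvCanon keys counters p).keys = PySem.List.dedup (p.map (pvKeyF keys)) := by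
  simp [pvCanon, PySem.Dict.keys_mk, Function.comp_def]

theorem pv_nodup_canon (keys counters : List String) (p : List (List (String × Int))) :
    (pvCanon keys counters p).keys.Nodup := by
  rw [pv_keys_canon]; exact PySem.Set.nodup_ofList _

theorem pv_contains_canon (keys counters : List String) (p : List (List (String × Int))) (kt : List (Option Int)) :
    (pvCanon keys counters p).contains kt = decide (kt ∈ p.map (pvKeyF keys)) := by
  rw [PySem.Dict.contains_eq_decide_mem_keys, pv_keys_canon]
  simp [PySem.List.dedup, PySem.Set.mem_ofList]

theorem pv_step (keys counters : List String) (h : counters.Nodup) (p : List (List (String × Int))) (r : List (String × Int)) :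
    (counters.foldl (fun result c =>
          result.insert (keys.map (fun k => (PySem.Dict.ofList r).get? k))
            ((result.getD (keys.map (fun k => (PySem.Dict.ofList r).get? k)) PySem.Dict.empty).insert c
              ((result.getD (keys.map (fun k => (PySem.Dict.ofList r).get? k)) PySem.Dict.empty).getD c 0
                + (PySem.Dict.ofList r).getD c 0)))
        (if (pvCanon keys counters p).contains (keys.map (fun k => (PySem.Dict.ofList r).get? k)) then pvCanon keys counters p
         else (pvCanon keys counters p).insert (keys.map (fun k => (PySem.Dict.ofList r).get? k)) PySem.Dict.empty))
      = pvCanon keys counters (p ++ [r]) := by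
  show (counters.foldl (fun result c =>
          result.insert (pvKeyF keys r)
            ((result.getD (pvKeyF keys r) PySem.Dict.empty).insert c
              ((result.getD (pvKeyF keys r) PySem.Dict.empty).getD c 0 + pvRv r c)))
        (if (pvCanon keys counters p).contains (pvKeyF keys r) then pvCanon keys counters p
         else (pvCanon keys counters p).insert (pvKeyF keys r) PySem.Dict.empty))
      = pvCanon keys counters (p ++ [r])
  by_cases hmem : pvKeyF keys r ∈ p.map (pvKeyF keys)
  · -- existing group
    have hcont : (pvCanon keys counters p).contains (pvKeyF keys r) = true := by
      rw [pv_contains_canon]; simp [hmem]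
    rw [if_pos hcont]
    have hgd : (pvCanon keys counters p).getD (pvKeyF keys r) PySem.Dict.empty
        = PySem.Dict.mk (counters.map (fun c => (c, pvS keys p (pvKeyF keys r) c))) := by
      apply PySem.Dict.getD_of_mem_items _ _ (pv_nodup_canon keys counters p)
      show _ ∈ (pvCanon keys counters p).items
      unfold pvCanon
      apply List.mem_map_of_mem
      simp [PySem.List.dedup, PySem.Set.mem_ofList, hmem]
    rw [pv_outer_fold counters (fun t c => t.insert c (t.getD c 0 + pvRv r c)) PySem.Dict.empty _ _ (pv_nodup_canon keys counters p) hcont, hgd]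
    have hio := pv_inner_overwrite counters (pvRv r) (fun c => pvS keys p (pvKeyF keys r) c) [] (by simpa using h)
    simp only [List.nil_append] at hio
    rw [hio]
    apply PySem.Dict.ext
    rw [PySem.Dict.items_insert_of_contains _ _ hcont]
    show List.map _ (pvCanon keys counters p).items = _
    unfold pvCanon
    have hded : PySem.List.dedup ((p ++ [r]).map (pvKeyF keys)) = PySem.List.dedup (p.map (pvKeyF keys)) := by
      rw [List.map_append, List.map_singleton, pv_dedup_append, if_pos hmem]
    rw [hded, List.map_map]
    show _ = List.map _ (PySem.List.dedup (List.map (pvKeyF keys) p))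
    apply List.map_congr_left
    intro kt hkt
    by_cases hktk : kt = pvKeyF keys r
    · subst hktk
      simp only [Function.comp_apply, beq_self_eq_true, if_pos]
      congr 2
      apply List.map_congr_left
      intro c _
      rw [pvS_append_eq]
    · have : (kt == pvKeyF keys r) = false := by simp [hktk]
      simp only [Function.comp_apply, this, Bool.false_eq_true, if_false]
      congr 2
      apply List.map_congr_left
      intro c _
      rw [pvS_append_ne _ _ _ _ _ (fun e => hktk e.symm)]
  · -- new group
    have hcont : (pvCanon keys counters p).contains (pvKeyF keys r) = false := by
      rw [pv_contains_canon]; simp [hmem]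
    rw [if_neg (by simp [hcont])]
    have hnd1 : ((pvCanon keys counters p).insert (pvKeyF keys r) PySem.Dict.empty).keys.Nodup := by
      rw [PySem.Dict.keys_insert_of_not_contains _ _ hcont, pv_keys_canon]
      refine List.Nodup.append (PySem.Set.nodup_ofList _) (List.nodup_singleton _) ?_
      intro a ha hb
      simp only [List.mem_singleton] at hb
      subst hb
      rw [PySem.List.dedup] at ha
      exact hmem ((PySem.Set.mem_ofList _ _).mp ha)
    rw [pv_outer_fold counters (fun t c => t.insert c (t.getD c 0 + pvRv r c)) PySem.Dict.empty _ _ hnd1 (PySem.Dict.contains_insert_self _ _ _)]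
    rw [PySem.Dict.getD_insert_self]
    rw [pv_inner_fresh counters (pvRv r) PySem.Dict.empty h (fun c _ => rfl)]
    rw [PySem.Dict.insert_insert_self]
    apply PySem.Dict.ext
    rw [PySem.Dict.items_insert_of_not_contains _ _ hcont]
    show (pvCanon keys counters p).items ++ _ = _
    unfold pvCanon
    have hded : PySem.List.dedup ((p ++ [r]).map (pvKeyF keys))
        = PySem.List.dedup (p.map (pvKeyF keys)) ++ [pvKeyF keys r] := by
      rw [List.map_append, List.map_singleton, pv_dedup_append, if_neg hmem]
    rw [hded, List.map_append, List.map_singleton]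
    congr 1
    · apply List.map_congr_left
      intro kt hkt
      have hktmem : kt ∈ p.map (pvKeyF keys) := by
        rw [PySem.List.dedup] at hkt
        exact (PySem.Set.mem_ofList _ _).mp hkt
      have hne : pvKeyF keys r ≠ kt := fun e => hmem (e ▸ hktmem)
      congr 2
      apply List.map_congr_left
      intro c _
      rw [pvS_append_ne _ _ _ _ _ hne]
    · have hz : (PySem.Dict.empty : PySem.Dict String Int).items ++ List.map (fun c => (c, pvRv r c)) counters
          = List.map (fun c => (c, pvS keys (p ++ [r]) (pvKeyF keys r) c)) counters := by
        rw [show (PySem.Dict.empty : PySem.Dict String Int).items = [] from rfl, List.nil_append]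
        apply List.map_congr_left
        intro c _
        rw [pvS_append_eq, pvS_not_mem _ _ _ _ hmem, zero_add]
      rw [hz]

theorem pv_main (keys counters : List String) (h : counters.Nodup) :
    ∀ (records p : List (List (String × Int))),
    records.foldl (fun (result : PySem.Dict (List (Option Int)) (PySem.Dict String Int)) r =>
      counters.foldl (fun result c =>
          result.insert (keys.map (fun k => (PySem.Dict.ofList r).get? k))
            ((result.getD (keys.map (fun k => (PySem.Dict.ofList r).get? k)) PySem.Dict.empty).insert c
              ((result.getD (keys.map (fun k => (PySem.Dict.ofList r).get? k)) PySem.Dict.empty).getD c 0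
                + (PySem.Dict.ofList r).getD c 0)))
        (if result.contains (keys.map (fun k => (PySem.Dict.ofList r).get? k)) then result
         else result.insert (keys.map (fun k => (PySem.Dict.ofList r).get? k)) PySem.Dict.empty))
      (pvCanon keys counters p) = pvCanon keys counters (p ++ records) := by
  intro records
  induction records with
  | nil => intro p; simp
  | cons r rs ih =>
    intro p
    have h1 := pv_step keys counters h p r
    simp only [List.foldl_cons]
    rw [h1, ih (p ++ [r])]
    simp

-- ===== VERDICT (by name: the statement is the Claim_ definition above) =====
theorem sum_by_keys_spec : Claim_equal_sum_by_keys := by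
  intro records keys counters _ hpre
  unfold Spec_sum_by_keys sum_by_keys sum_by_keys_alt
  have hm := pv_main keys counters hpre records []
  simp only [List.nil_append] at hm
  rw [show (PySem.Dict.empty : PySem.Dict (List (Option Int)) (PySem.Dict String Int)) = pvCanon keys counters [] from rfl, hm]
  simp only [pvCanon, List.map_map]
  rfl
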